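-- pv_equiv track=rewrite | github.com/wojmichaluk/ASD-2022-2023 | extra/bit algo/8/3.py | timetable
-- ===== SOURCE A (Python) =====
-- from queue import PriorityQueue
--
-- def timetable(times,m):
--     n=len(times)
--     q=PriorityQueue()
--     for i in range(n):
--         q.put((times[i][0],1))
--         q.put((times[i][1],-1))
--     cnt=0
--     while not q.empty():
--         t,l=q.get()
--         cnt+=l
--         if cnt>m: return False
--     return True
-- ===== SOURCE B (Python) =====
-- def timetable(times, m):
--     # Closed-form characterization: the sweep's overlap count peaks right after
--     # the last start event at some time s, where it equals
--     # (#starts <= s) - (#ends <= s).  So no event queue / running counter is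
--     # needed: the answer is just whether that peak stays <= m.
--     if not times:
--         return True
--     starts = [a for a, _ in times]
--     ends = [b for _, b in times]
--     vals = [sum(1 for a in starts if a <= s) - sum(1 for b in ends if b <= s)
--             for s in starts]
--     return max(vals) <= m
-- ===== Notes on version B (the rewrite author's own statement) =====
-- stated objective: alternative
-- what changed: Replaces the priority-queue event sweep with a running +1/-1 counter by a closed-form per-start counting characterization: the sweep's count peaks at some start time s where it equals #(starts <= s) - #(ends <= s), so B just takes the max of these counts over all starts and compares it with m.
import Mathlib
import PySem

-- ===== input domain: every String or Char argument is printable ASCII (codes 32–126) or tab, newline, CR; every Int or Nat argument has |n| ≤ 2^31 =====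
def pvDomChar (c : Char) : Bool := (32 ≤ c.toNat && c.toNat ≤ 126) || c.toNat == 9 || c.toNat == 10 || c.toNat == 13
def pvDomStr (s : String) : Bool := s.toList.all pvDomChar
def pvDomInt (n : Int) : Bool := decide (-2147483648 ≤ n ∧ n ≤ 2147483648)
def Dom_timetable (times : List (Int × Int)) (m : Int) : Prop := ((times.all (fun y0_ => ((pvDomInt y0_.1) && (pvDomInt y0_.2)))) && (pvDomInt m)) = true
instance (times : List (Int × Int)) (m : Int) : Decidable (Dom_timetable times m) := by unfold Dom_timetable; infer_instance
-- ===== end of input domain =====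

-- B replaces A's event sweep (priority queue + running ±1 counter) by a
-- closed-form characterization: the overlap count peaks right after the last
-- start event at some time s, where it equals #(starts ≤ s) − #(ends ≤ s);
-- B just takes the max of those per-start counts (objective: alternative).

-- ===== PORT A =====
-- A's while loop over q.get(): cnt += l; if cnt > m: return False.
def tmLoopA (m : Int) : List (Int × Int) → Int → Bool
  | [], _ => true
  | (_, l) :: rest, cnt =>
    let c := cnt + l
    if c > m then false else tmLoopA m rest c

-- Draining the PriorityQueue yields its elements in nondecreasing tuple order
-- (t, l); equal tuples are identical values, so the drain order is exactly the
-- tuple-sorted list of the inserted events — exact (sorted2 = Python tuple key).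
def timetable (times : List (Int × Int)) (m : Int) : Bool :=
  let evs := times.foldl (fun acc p => acc ++ [(p.1, (1 : Int)), (p.2, (-1 : Int))]) []
  tmLoopA m (PySem.List.sorted2 evs (fun p => p.1) (fun p => p.2) false) 0

-- ===== PORT B =====
-- sum(1 for a in xs if a <= s)
def cntLeB (xs : List Int) (s : Int) : Int :=
  xs.foldl (fun acc a => acc + (if a ≤ s then 1 else 0)) 0

def timetable_alt (times : List (Int × Int)) (m : Int) : Bool :=
  if times.isEmpty then true
  else
    let starts := times.map (fun t => t.1)
    let ends := times.map (fun t => t.2)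
    let vals := starts.map (fun s => cntLeB starts s - cntLeB ends s)
    match PySem.List.max? vals (fun x => x) with
    | some peak => decide (peak ≤ m)
    | none => true  -- unreachable: vals is nonempty here

-- ===== PRECONDITION & SPEC =====
def Spec_timetable (times : List (Int × Int)) (m : Int) (out : Bool) : Prop := out = timetable_alt times m
instance (times : List (Int × Int)) (m : Int) (out : Bool) : Decidable (Spec_timetable times m out) := by unfold Spec_timetable; infer_instance

-- ===== CLAIM (what is proved, stated in full; the proofs are below) =====
def Claim_equal_timetable : Prop := ∀ (times : List (Int × Int)) (m : Int), Dom_timetable times m → Spec_timetable times m (timetable times m)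

-- ===== LEMMAS AND PROOFS =====

-- Python's lexicographic ≤ on (time, label) pairs.
def tmLe (a b : Int × Int) : Prop := a.1 < b.1 ∨ (a.1 = b.1 ∧ a.2 ≤ b.2)

-- The sorted event sequence, described as a merge of the sorted starts with
-- the sorted ends (ends first on ties, since -1 < 1).
def tmMerge : List Int → List Int → List (Int × Int)
  | [], [] => []
  | [], e :: es => (e, -1) :: tmMerge [] es
  | s :: ss, [] => (s, 1) :: tmMerge ss []
  | s :: ss, e :: es =>
    if s < e then (s, 1) :: tmMerge ss (e :: es) else (e, -1) :: tmMerge (s :: ss) es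
  termination_by ss es => ss.length + es.length

theorem mem_tmMerge : ∀ (ss es : List Int) (z : Int × Int),
    z ∈ tmMerge ss es ↔ (z.2 = 1 ∧ z.1 ∈ ss) ∨ (z.2 = -1 ∧ z.1 ∈ es)
  | [], [], z => by simp [tmMerge]
  | [], e :: es, z => by
    have ih := mem_tmMerge [] es z
    obtain ⟨z1, z2⟩ := z
    simp [tmMerge, ih] at *
    constructor
    · rintro (⟨rfl, rfl⟩ | ⟨h, h'⟩) <;> tauto
    · rintro ⟨rfl, (rfl | h)⟩ <;> tauto
  | s :: ss, [], z => by
    have ih := mem_tmMerge ss [] z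
    obtain ⟨z1, z2⟩ := z
    simp [tmMerge, ih] at *
    constructor
    · rintro (⟨rfl, rfl⟩ | ⟨h, h'⟩) <;> tauto
    · rintro ⟨rfl, (rfl | h)⟩ <;> tauto
  | s :: ss, e :: es, z => by
    have ih1 := mem_tmMerge ss (e :: es) z
    have ih2 := mem_tmMerge (s :: ss) es z
    obtain ⟨z1, z2⟩ := z
    by_cases h : s < e <;> simp [tmMerge, h, ih1, ih2] at * <;> tauto
  termination_by ss es _ => ss.length + es.length

theorem tmLe_start (s : Int) (z : Int × Int) (h : z.2 = 1) (hle : s ≤ z.1) : tmLe (s, 1) z := by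
  show s < z.1 ∨ (s = z.1 ∧ (1 : Int) ≤ z.2)
  omega

theorem tmLe_start_end (s : Int) (z : Int × Int) (hlt : s < z.1) : tmLe (s, 1) z := by
  show s < z.1 ∨ (s = z.1 ∧ (1 : Int) ≤ z.2)
  omega

theorem tmLe_end (e : Int) (z : Int × Int) (h : z.2 = 1 ∨ z.2 = -1) (hle : e ≤ z.1) :
    tmLe (e, -1) z := by
  show e < z.1 ∨ (e = z.1 ∧ (-1 : Int) ≤ z.2)
  omega

theorem tmMerge_pairwise : ∀ (ss es : List Int),
    ss.Pairwise (· ≤ ·) → es.Pairwise (· ≤ ·) → (tmMerge ss es).Pairwise tmLe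
  | [], [], _, _ => by simp [tmMerge]
  | [], e :: es, hs, he => by
    rw [List.pairwise_cons] at he
    rw [tmMerge, List.pairwise_cons]
    refine ⟨fun z hz => ?_, tmMerge_pairwise [] es hs he.2⟩
    rcases (mem_tmMerge [] es z).1 hz with ⟨h1, h2⟩ | ⟨h1, h2⟩
    · simp at h2
    · exact tmLe_end e z (Or.inr h1) (he.1 z.1 h2)
  | s :: ss, [], hs, he => by
    rw [List.pairwise_cons] at hs
    rw [tmMerge, List.pairwise_cons]
    refine ⟨fun z hz => ?_, tmMerge_pairwise ss [] hs.2 he⟩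
    rcases (mem_tmMerge ss [] z).1 hz with ⟨h1, h2⟩ | ⟨h1, h2⟩
    · exact tmLe_start s z h1 (hs.1 z.1 h2)
    · simp at h2
  | s :: ss, e :: es, hs, he => by
    rw [List.pairwise_cons] at hs he
    rw [tmMerge]
    by_cases h : s < e
    · rw [if_pos h, List.pairwise_cons]
      refine ⟨fun z hz => ?_,
        tmMerge_pairwise ss (e :: es) hs.2 (List.pairwise_cons.2 he)⟩
      rcases (mem_tmMerge ss (e :: es) z).1 hz with ⟨h1, h2⟩ | ⟨h1, h2⟩
      · exact tmLe_start s z h1 (hs.1 z.1 h2)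
      · have he1 : e ≤ z.1 := by
          rcases List.mem_cons.1 h2 with h2 | h2
          · exact h2.ge
          · exact he.1 z.1 h2
        exact tmLe_start_end s z (lt_of_lt_of_le h he1)
    · rw [if_neg h, List.pairwise_cons]
      refine ⟨fun z hz => ?_,
        tmMerge_pairwise (s :: ss) es (List.pairwise_cons.2 hs) he.2⟩
      rcases (mem_tmMerge (s :: ss) es z).1 hz with ⟨h1, h2⟩ | ⟨h1, h2⟩
      · have hs1 : s ≤ z.1 := by
          rcases List.mem_cons.1 h2 with h2 | h2
          · exact h2.ge
          · exact hs.1 z.1 h2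
        exact tmLe_end e z (Or.inl h1) (le_trans (not_lt.1 h) hs1)
      · exact tmLe_end e z (Or.inr h1) (he.1 z.1 h2)
  termination_by ss es => ss.length + es.length

theorem tmMerge_perm : ∀ (ss es : List Int),
    (tmMerge ss es).Perm (ss.map (fun s => (s, 1)) ++ es.map (fun e => (e, -1)))
  | [], [] => by simp [tmMerge]
  | [], e :: es => by
    rw [tmMerge]
    simpa using (tmMerge_perm [] es).cons (e, -1)
  | s :: ss, [] => by
    rw [tmMerge]
    simpa using (tmMerge_perm ss []).cons (s, 1)
  | s :: ss, e :: es => by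
    rw [tmMerge]
    by_cases h : s < e
    · rw [if_pos h]
      simpa using (tmMerge_perm ss (e :: es)).cons (s, 1)
    · rw [if_neg h]
      refine ((tmMerge_perm (s :: ss) es).cons (e, -1)).trans ?_
      exact List.perm_middle.symm
  termination_by ss es => ss.length + es.length

theorem tmBefore_true {x y : Int × Int}
    (h : (decide (x.1 < y.1) || !decide (y.1 < x.1) && decide (x.2 < y.2)) = true) :
    tmLe x y := by
  simp only [Bool.or_eq_true, Bool.and_eq_true, Bool.not_eq_true', decide_eq_true_eq,
    decide_eq_false_iff_not] at h
  unfold tmLe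
  omega

theorem tmBefore_false {x y : Int × Int}
    (h : (decide (x.1 < y.1) || !decide (y.1 < x.1) && decide (x.2 < y.2)) = false) :
    tmLe y x := by
  simp only [Bool.or_eq_false_iff, Bool.and_eq_false_iff, Bool.not_eq_false', decide_eq_true_eq,
    decide_eq_false_iff_not] at h
  unfold tmLe
  omega

theorem tmLe_trans {a b c : Int × Int} (h1 : tmLe a b) (h2 : tmLe b c) : tmLe a c := by
  unfold tmLe at *
  omega

theorem insertBy_pairwise (x : Int × Int) :
    ∀ (acc : List (Int × Int)), acc.Pairwise tmLe →
    (PySem.List.insertBy (fun a b => decide (a.1 < b.1) || !decide (b.1 < a.1) && decide (a.2 < b.2)) x acc).Pairwise tmLe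
  | [], _ => by simp [PySem.List.insertBy]
  | y :: ys, h => by
    rw [List.pairwise_cons] at h
    rw [show PySem.List.insertBy (fun a b => decide (a.1 < b.1) || !decide (b.1 < a.1) && decide (a.2 < b.2)) x (y :: ys)
        = if (decide (x.1 < y.1) || !decide (y.1 < x.1) && decide (x.2 < y.2)) then x :: y :: ys
          else y :: PySem.List.insertBy (fun a b => decide (a.1 < b.1) || !decide (b.1 < a.1) && decide (a.2 < b.2)) x ys from rfl]
    by_cases hb : (decide (x.1 < y.1) || !decide (y.1 < x.1) && decide (x.2 < y.2)) = true
    · rw [if_pos hb, List.pairwise_cons]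
      have hxy := tmBefore_true hb
      refine ⟨fun z hz => ?_, List.pairwise_cons.2 h⟩
      rcases List.mem_cons.1 hz with rfl | hz
      · exact hxy
      · exact tmLe_trans hxy (h.1 z hz)
    · rw [if_neg hb, List.pairwise_cons]
      have hb' : (decide (x.1 < y.1) || !decide (y.1 < x.1) && decide (x.2 < y.2)) = false := by
        simpa using hb
      have hyx := tmBefore_false hb'
      refine ⟨fun z hz => ?_, insertBy_pairwise x ys h.2⟩
      rcases (PySem.List.mem_insertBy _ x z ys).1 hz with rfl | hz
      · exact hyx
      · exact h.1 z hz

theorem foldl_insertBy_pairwise :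
    ∀ (xs acc : List (Int × Int)), acc.Pairwise tmLe →
    (xs.foldl (fun acc x => PySem.List.insertBy (fun a b => decide (a.1 < b.1) || !decide (b.1 < a.1) && decide (a.2 < b.2)) x acc) acc).Pairwise tmLe
  | [], acc, h => h
  | x :: xs, acc, h => foldl_insertBy_pairwise xs _ (insertBy_pairwise x acc h)

theorem sorted2_pairwise_tmLe (xs : List (Int × Int)) :
    (PySem.List.sorted2 xs (fun p => p.1) (fun p => p.2) false).Pairwise tmLe :=
  foldl_insertBy_pairwise xs [] (by simp)

theorem flatMap_pairs_perm : ∀ (times : List (Int × Int)),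
    (times.flatMap (fun p => [(p.1, (1 : Int)), (p.2, (-1 : Int))])).Perm
      (times.map (fun p => (p.1, (1 : Int))) ++ times.map (fun p => (p.2, (-1 : Int))))
  | [] => by simp
  | p :: ts => by
    simp only [List.flatMap_cons, List.map_cons]
    refine (((flatMap_pairs_perm ts).cons (p.2, -1)).cons (p.1, 1)).trans ?_
    exact ((List.perm_middle.symm).cons (p.1, 1))

theorem sorted2_eq_tmMerge (times : List (Int × Int)) :
    PySem.List.sorted2 (times.foldl (fun acc p => acc ++ [(p.1, (1 : Int)), (p.2, (-1 : Int))]) [])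
        (fun p => p.1) (fun p => p.2) false
      = tmMerge (PySem.List.sorted (times.map (fun t => t.1)) (fun x => x) false)
                (PySem.List.sorted (times.map (fun t => t.2)) (fun x => x) false) := by
  have hfold : times.foldl (fun acc p => acc ++ [(p.1, (1 : Int)), (p.2, (-1 : Int))]) []
      = times.flatMap (fun p => [(p.1, (1 : Int)), (p.2, (-1 : Int))]) := by
    simpa using PySem.List.foldl_append_eq_flatMap (fun p => [(p.1, (1 : Int)), (p.2, (-1 : Int))]) times []
  have hS : ((PySem.List.sorted (times.map (fun t => t.1)) (fun x => x) false).map (fun s => (s, (1 : Int)))).Perm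
      (times.map (fun p => (p.1, (1 : Int)))) := by
    have := (PySem.List.sorted_perm (times.map (fun t => t.1)) (fun x => x) false).map (fun s => (s, (1 : Int)))
    simpa [List.map_map, Function.comp] using this
  have hE : ((PySem.List.sorted (times.map (fun t => t.2)) (fun x => x) false).map (fun e => (e, (-1 : Int)))).Perm
      (times.map (fun p => (p.2, (-1 : Int)))) := by
    have := (PySem.List.sorted_perm (times.map (fun t => t.2)) (fun x => x) false).map (fun e => (e, (-1 : Int)))
    simpa [List.map_map, Function.comp] using this
  have hperm : (PySem.List.sorted2 (times.foldl (fun acc p => acc ++ [(p.1, (1 : Int)), (p.2, (-1 : Int))]) [])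
      (fun p => p.1) (fun p => p.2) false).Perm
      (tmMerge (PySem.List.sorted (times.map (fun t => t.1)) (fun x => x) false)
               (PySem.List.sorted (times.map (fun t => t.2)) (fun x => x) false)) := by
    refine (PySem.List.sorted2_perm _ _ _ _).trans ?_
    rw [hfold]
    refine (flatMap_pairs_perm times).trans ?_
    exact ((hS.append hE).symm.trans (tmMerge_perm _ _).symm)
  refine List.eq_of_perm_of_sorted (le := tmLe) ?_ (sorted2_pairwise_tmLe _) ?_ hperm
  · intro a b _ _ hab hba
    obtain ⟨a1, a2⟩ := a
    obtain ⟨b1, b2⟩ := b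
    simp only [tmLe, Prod.mk.injEq] at *
    omega
  · refine tmMerge_pairwise _ _ ?_ ?_ <;>
      simpa using PySem.List.sorted_pairwise (κ := Int) _ (fun x => x)

-- ---- counting characterization ----

-- #(elements ≤ s), as an Int.
def cntP (xs : List Int) (s : Int) : Int := (xs.countP (fun a => decide (a ≤ s)) : Int)

theorem cntP_nil (s : Int) : cntP [] s = 0 := rfl

theorem cntP_cons (x s : Int) (xs : List Int) :
    cntP (x :: xs) s = (if x ≤ s then 1 else 0) + cntP xs s := by
  simp [cntP, List.countP_cons]
  by_cases h : x ≤ s <;> simp [h] <;> omega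

theorem cntP_nonneg (xs : List Int) (s : Int) : 0 ≤ cntP xs s := by
  simp [cntP]

theorem cntP_le_length (xs : List Int) (s : Int) : cntP xs s ≤ xs.length := by
  simp only [cntP, Nat.cast_le]
  exact List.countP_le_length

theorem cntP_eq_length (xs : List Int) (s : Int) (h : ∀ a ∈ xs, a ≤ s) :
    cntP xs s = xs.length := by
  simp only [cntP, Nat.cast_inj]
  exact List.countP_eq_length.2 (fun a ha => by simpa using h a ha)

theorem cntP_eq_zero (xs : List Int) (s : Int) (h : ∀ a ∈ xs, ¬ a ≤ s) :
    cntP xs s = 0 := by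
  simp only [cntP, Nat.cast_eq_zero]
  exact List.countP_eq_zero.2 (fun a ha => by simpa using h a ha)

theorem cntP_perm {xs ys : List Int} (h : xs.Perm ys) (s : Int) : cntP xs s = cntP ys s := by
  simp [cntP, h.countP_eq]

theorem cntLeB_eq_cntP (xs : List Int) (s : Int) : cntLeB xs s = cntP xs s := by
  suffices h : ∀ (c : Int), xs.foldl (fun acc a => acc + (if a ≤ s then 1 else 0)) c = c + cntP xs s by
    simpa using h 0
  induction xs with
  | nil => intro c; simp [cntP_nil]
  | cons x xs ih =>
    intro c
    simp only [List.foldl_cons, ih, cntP_cons]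
    ring

-- The invariant of the sweep: every per-start peak stays ≤ m, and if only ends
-- remain the very next prefix (cnt − 1) stays ≤ m too.
def peakG (m : Int) (S E : List Int) (cnt : Int) : Prop :=
  (∀ s ∈ S, cnt + cntP S s - cntP E s ≤ m) ∧ (S = [] → E = [] ∨ cnt - 1 ≤ m)

theorem exists_max (x : Int) : ∀ (xs : List Int), ∃ y ∈ x :: xs, ∀ a ∈ x :: xs, a ≤ y
  | [] => ⟨x, by simp⟩
  | z :: zs => by
    obtain ⟨y, hy, hmax⟩ := exists_max z zs
    by_cases h : x ≤ y
    · exact ⟨y, List.mem_cons_of_mem _ hy, by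
        intro a ha
        rcases List.mem_cons.1 ha with rfl | ha
        · exact h
        · exact hmax a ha⟩
    · exact ⟨x, List.mem_cons_self, by
        intro a ha
        rcases List.mem_cons.1 ha with rfl | ha
        · exact le_refl a
        · exact le_trans (hmax a ha) (not_le.1 h).le⟩

theorem loopA_to_peakG (m : Int) : ∀ (S E : List Int) (cnt : Int),
    S.Pairwise (· ≤ ·) → E.Pairwise (· ≤ ·) →
    tmLoopA m (tmMerge S E) cnt = true → peakG m S E cnt
  | [], [], cnt, _, _, _ => ⟨by simp, fun _ => Or.inl rfl⟩
  | [], e :: es, cnt, hS, hE, h => by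
    rw [tmMerge] at h
    simp only [tmLoopA] at h
    split_ifs at h with hc
    exact ⟨by simp, fun _ => Or.inr (by omega)⟩
  | s :: ss, [], cnt, hS, hE, h => by
    rw [tmMerge] at h
    simp only [tmLoopA] at h
    split_ifs at h with hc
    rw [List.pairwise_cons] at hS
    have ih := loopA_to_peakG m ss [] (cnt + 1) hS.2 hE h
    refine ⟨?_, fun hne => by simp at hne⟩
    intro x hx
    rcases List.mem_cons.1 hx with rfl | hx
    · rw [cntP_cons x x ss, if_pos (le_refl x), cntP_nil]
      by_cases hmem : x ∈ ss
      · have := ih.1 x hmem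
        rw [cntP_nil] at this
        omega
      · have hz : cntP ss x = 0 := cntP_eq_zero ss x (fun a ha => by
          have h1 := hS.1 a ha
          intro h2
          exact hmem (by rwa [le_antisymm h2 h1] at ha))
        omega
    · have := ih.1 x hx
      rw [cntP_cons s x ss, if_pos (hS.1 x hx)]
      omega
  | s :: ss, e :: es, cnt, hS, hE, h => by
    rw [tmMerge] at h
    rw [List.pairwise_cons] at hS hE
    by_cases hse : s < e
    · rw [if_pos hse] at h
      simp only [tmLoopA] at h
      split_ifs at h with hc
      have ih := loopA_to_peakG m ss (e :: es) (cnt + 1) hS.2 (List.pairwise_cons.2 hE) h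
      refine ⟨?_, fun hne => by simp at hne⟩
      intro x hx
      have hEzero : cntP (e :: es) s = 0 := cntP_eq_zero _ s (by
        intro b hb
        rcases List.mem_cons.1 hb with rfl | hb
        · omega
        · have := hE.1 b hb; omega)
      rcases List.mem_cons.1 hx with rfl | hx
      · rw [cntP_cons x x ss, if_pos (le_refl x), hEzero]
        by_cases hmem : x ∈ ss
        · have := ih.1 x hmem
          rw [hEzero] at this
          omega
        · have hz : cntP ss x = 0 := cntP_eq_zero ss x (fun a ha => by
            have h1 := hS.1 a ha
            intro h2
            exact hmem (by rwa [le_antisymm h2 h1] at ha))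
          omega
      · have := ih.1 x hx
        rw [cntP_cons s x ss, if_pos (hS.1 x hx)]
        omega
    · rw [if_neg hse] at h
      simp only [tmLoopA] at h
      split_ifs at h with hc
      have ih := loopA_to_peakG m (s :: ss) es (cnt + -1) (List.pairwise_cons.2 hS) hE.2 h
      refine ⟨?_, fun hne => by simp at hne⟩
      intro x hx
      have hex : e ≤ x := by
        rcases List.mem_cons.1 hx with rfl | hx
        · omega
        · have := hS.1 x hx; omega
      have := ih.1 x hx
      rw [cntP_cons e x es, if_pos hex]
      omega
  termination_by S E _ => S.length + E.length

theorem peakG_to_loopA (m : Int) : ∀ (S E : List Int) (cnt : Int),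
    S.Pairwise (· ≤ ·) → E.Pairwise (· ≤ ·) →
    (cnt ≤ m ∨ (cnt ≤ 0 ∧ (E.length : Int) ≤ (S.length : Int) + cnt)) →
    peakG m S E cnt → tmLoopA m (tmMerge S E) cnt = true
  | [], [], cnt, _, _, _, _ => by rw [tmMerge]; rfl
  | [], e :: es, cnt, hS, hE, hH, hG => by
    have hle : cnt - 1 ≤ m := by
      rcases hG.2 rfl with h | h
      · simp at h
      · exact h
    rw [tmMerge]
    simp only [tmLoopA]
    rw [if_neg (by omega)]
    exact peakG_to_loopA m [] es (cnt + -1) hS hE.tail (Or.inl (by omega))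
      ⟨by simp, fun _ => Or.inr (by omega)⟩
  | s :: ss, [], cnt, hS, hE, hH, hG => by
    rw [List.pairwise_cons] at hS
    have hs := hG.1 s List.mem_cons_self
    rw [cntP_cons s s ss, if_pos (le_refl s), cntP_nil] at hs
    have hnn := cntP_nonneg ss s
    rw [tmMerge]
    simp only [tmLoopA]
    rw [if_neg (by omega)]
    refine peakG_to_loopA m ss [] (cnt + 1) hS.2 hE (Or.inl (by omega)) ⟨?_, fun _ => Or.inl rfl⟩
    intro x hx
    have := hG.1 x (List.mem_cons_of_mem _ hx)
    rw [cntP_cons s x ss, if_pos (hS.1 x hx)] at this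
    simp only [cntP_nil] at this ⊢
    omega
  | s :: ss, e :: es, cnt, hS, hE, hH, hG => by
    rw [List.pairwise_cons] at hS hE
    by_cases hse : s < e
    · have hEzero : cntP (e :: es) s = 0 := cntP_eq_zero _ s (by
        intro b hb
        rcases List.mem_cons.1 hb with rfl | hb
        · omega
        · have := hE.1 b hb; omega)
      have hs := hG.1 s List.mem_cons_self
      rw [cntP_cons s s ss, if_pos (le_refl s), hEzero] at hs
      have hnn := cntP_nonneg ss s
      rw [tmMerge, if_pos hse]
      simp only [tmLoopA]
      rw [if_neg (by omega)]
      refine peakG_to_loopA m ss (e :: es) (cnt + 1) hS.2 (List.pairwise_cons.2 hE)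
        (Or.inl (by omega)) ⟨?_, fun _ => Or.inr (by omega)⟩
      intro x hx
      have := hG.1 x (List.mem_cons_of_mem _ hx)
      rw [cntP_cons s x ss, if_pos (hS.1 x hx)] at this
      omega
    · have hcheck : cnt - 1 ≤ m := by
        rcases hH with h | ⟨hc0, hlen⟩
        · omega
        · obtain ⟨y, hy, hmax⟩ := exists_max s ss
          have hG1 := hG.1 y hy
          have h1 : cntP (s :: ss) y = (s :: ss).length := cntP_eq_length _ y hmax
          have h2 := cntP_le_length (e :: es) y
          rw [h1] at hG1
          omega
      rw [tmMerge, if_neg hse]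
      simp only [tmLoopA]
      rw [if_neg (by omega)]
      refine peakG_to_loopA m (s :: ss) es (cnt + -1) (List.pairwise_cons.2 hS) hE.2
        ?_ ⟨?_, fun hne => by simp at hne⟩
      · rcases hH with h | ⟨hc0, hlen⟩
        · exact Or.inl (by omega)
        · refine Or.inr ⟨by omega, ?_⟩
          simp only [List.length_cons] at hlen ⊢
          push_cast at hlen ⊢
          omega
      · intro x hx
        have hex : e ≤ x := by
          rcases List.mem_cons.1 hx with rfl | hx
          · omega
          · have := hS.1 x hx; omega
        have := hG.1 x hx
        rw [cntP_cons e x es, if_pos hex] at this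
        omega
  termination_by S E _ => S.length + E.length

-- ===== VERDICT (by name: the statement is the Claim_ definition above) =====
theorem timetable_spec : Claim_equal_timetable := by
  intro times m _
  show timetable times m = timetable_alt times m
  by_cases hne : times = []
  · subst hne; rfl
  · set S := PySem.List.sorted (times.map (fun t => t.1)) (fun x => x) false with hSdef
    set E := PySem.List.sorted (times.map (fun t => t.2)) (fun x => x) false with hEdef
    have hSp : S.Pairwise (· ≤ ·) := by
      simpa using PySem.List.sorted_pairwise (κ := Int) (times.map (fun t => t.1)) (fun x => x)
    have hEp : E.Pairwise (· ≤ ·) := by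
      simpa using PySem.List.sorted_pairwise (κ := Int) (times.map (fun t => t.2)) (fun x => x)
    have hSperm : S.Perm (times.map (fun t => t.1)) := PySem.List.sorted_perm _ _ _
    have hEperm : E.Perm (times.map (fun t => t.2)) := PySem.List.sorted_perm _ _ _
    have hmapne : times.map (fun t : Int × Int => t.1) ≠ [] := by simpa using hne
    have hSne : S ≠ [] := by
      intro h
      rw [h] at hSperm
      exact hmapne (hSperm.symm.eq_nil)
    have hlen : (E.length : Int) ≤ (S.length : Int) + 0 := by
      rw [hSperm.length_eq, hEperm.length_eq]
      simp
    have hA : timetable times m = tmLoopA m (tmMerge S E) 0 := by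
      show tmLoopA m (PySem.List.sorted2
          (times.foldl (fun acc p => acc ++ [(p.1, (1 : Int)), (p.2, (-1 : Int))]) [])
          (fun p => p.1) (fun p => p.2) false) 0 = _
      rw [sorted2_eq_tmMerge]
    have hB : timetable_alt times m = true ↔ peakG m S E 0 := by
      have halt : timetable_alt times m
          = (match PySem.List.max? ((times.map (fun t : Int × Int => t.1)).map
                (fun s => cntLeB (times.map (fun t => t.1)) s - cntLeB (times.map (fun t => t.2)) s))
                (fun x => x) with
             | some peak => decide (peak ≤ m)
             | none => true) := by
        simp only [timetable_alt]
        rw [if_neg (by simpa using hne)]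
      rw [halt]
      have hvne : (times.map (fun t : Int × Int => t.1)).map
          (fun s => cntLeB (times.map (fun t => t.1)) s - cntLeB (times.map (fun t => t.2)) s) ≠ [] := by
        simpa using hmapne
      rcases hmax : PySem.List.max? ((times.map (fun t : Int × Int => t.1)).map
          (fun s => cntLeB (times.map (fun t => t.1)) s - cntLeB (times.map (fun t => t.2)) s))
          (fun x => x) with _ | peak
      · exact absurd ((PySem.List.max?_eq_none_iff _ _).1 hmax) hvne
      · have hmem := PySem.List.max?_mem hmax
        have hisMax := PySem.List.max?_isMax hmax
        simp only [decide_eq_true_eq]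
        constructor
        · intro h
          refine ⟨?_, fun hS0 => absurd hS0 hSne⟩
          intro s hs
          have hsS : s ∈ times.map (fun t : Int × Int => t.1) := hSperm.mem_iff.1 hs
          have hv : (cntLeB (times.map (fun t => t.1)) s - cntLeB (times.map (fun t => t.2)) s)
              ∈ (times.map (fun t : Int × Int => t.1)).map
                (fun s => cntLeB (times.map (fun t => t.1)) s - cntLeB (times.map (fun t => t.2)) s) :=
            List.mem_map_of_mem hsS
          have hle := hisMax _ hv
          simp only at hle
          rw [cntLeB_eq_cntP, cntLeB_eq_cntP, ← cntP_perm hSperm, ← cntP_perm hEperm] at hle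
          omega
        · intro hG
          rcases List.mem_map.1 hmem with ⟨s, hsmem, hval⟩
          have hsS : s ∈ S := hSperm.mem_iff.2 hsmem
          have hgs := hG.1 s hsS
          rw [← hval, cntLeB_eq_cntP, cntLeB_eq_cntP, ← cntP_perm hSperm, ← cntP_perm hEperm]
          omega
    rw [hA, Bool.eq_iff_iff, hB]
    constructor
    · intro h
      exact loopA_to_peakG m S E 0 hSp hEp h
    · intro h
      exact peakG_to_loopA m S E 0 hSp hEp (Or.inr ⟨le_refl 0, hlen⟩) h
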